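-- pv_equiv track=rewrite | github.com/cirosantilli/project-euler-solvers | solvers/217.py | build_unrestricted_dp
-- ===== SOURCE A (Python) =====
-- def build_unrestricted_dp(max_len: int, mod: int | None):
--     """
--     Digit-DP for sequences of length L (leading zeros allowed).
--
--     Returns:
--       counts[L][s] = number of length-L digit strings with digit-sum s
--       sums[L][s]   = sum of their numeric values (interpreted as L-digit with leading zeros)
--     """
--     counts = [None] * (max_len + 1)
--     sums = [None] * (max_len + 1)
--
--     counts[0] = [1]  # one empty string with sum 0
--     sums[0] = [0]
--
--     for L in range(1, max_len + 1):
--         prev_c = counts[L - 1]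
--         prev_s = sums[L - 1]
--         max_sum = 9 * L
--
--         c = [0] * (max_sum + 1)
--         s = [0] * (max_sum + 1)
--
--         for sum_prev in range(len(prev_c)):
--             cp = prev_c[sum_prev]
--             sp = prev_s[sum_prev]
--             if cp == 0 and sp == 0:
--                 continue
--             for d in range(10):
--                 idx = sum_prev + d
--                 c[idx] += cp
--                 s[idx] += sp * 10 + cp * d
--
--         if mod is not None:
--             c = [x % mod for x in c]
--             s = [x % mod for x in s]
--
--         counts[L] = c
--         sums[L] = s
--
--     return counts, sums
-- ===== SOURCE B (Python) =====
-- def build_unrestricted_dp(max_len: int, mod: int | None):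
--     """Same DP, but each level is computed by prefix-sum window differences
--     (gather per target cell) instead of scattering 10 digit updates."""
--     counts = [[1]]
--     sums = [[0]]
--     for L in range(1, max_len + 1):
--         prev_c = counts[-1]
--         prev_s = sums[-1]
--         n = len(prev_c)
--         pc = [0]
--         ps = [0]
--         pj = [0]
--         for j in range(n):
--             pc.append(pc[-1] + prev_c[j])
--             ps.append(ps[-1] + prev_s[j])
--             pj.append(pj[-1] + j * prev_c[j])
--         c = []
--         s = []
--         for idx in range(9 * L + 1):
--             lo = max(idx - 9, 0)
--             hi = min(idx + 1, n)
--             cc = pc[hi] - pc[lo]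
--             sv = 10 * (ps[hi] - ps[lo]) + idx * cc - (pj[hi] - pj[lo])
--             c.append(cc)
--             s.append(sv)
--         if mod is not None:
--             c = [x % mod for x in c]
--             s = [x % mod for x in s]
--         counts.append(c)
--         sums.append(s)
--     return counts, sums
-- ===== Notes on version B (the rewrite author's own statement) =====
-- stated objective: alternative
-- what changed: Each DP level is computed by building prefix-sum arrays (of counts, sums, and index-weighted counts) once and reading each target cell off as a 10-wide window difference, instead of scattering ten in-place digit updates from every source cell (gather via prefix sums vs scatter; A's zero-skip branch makes it faster on degenerate moduli, so no speed is claimed).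
import Mathlib
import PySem

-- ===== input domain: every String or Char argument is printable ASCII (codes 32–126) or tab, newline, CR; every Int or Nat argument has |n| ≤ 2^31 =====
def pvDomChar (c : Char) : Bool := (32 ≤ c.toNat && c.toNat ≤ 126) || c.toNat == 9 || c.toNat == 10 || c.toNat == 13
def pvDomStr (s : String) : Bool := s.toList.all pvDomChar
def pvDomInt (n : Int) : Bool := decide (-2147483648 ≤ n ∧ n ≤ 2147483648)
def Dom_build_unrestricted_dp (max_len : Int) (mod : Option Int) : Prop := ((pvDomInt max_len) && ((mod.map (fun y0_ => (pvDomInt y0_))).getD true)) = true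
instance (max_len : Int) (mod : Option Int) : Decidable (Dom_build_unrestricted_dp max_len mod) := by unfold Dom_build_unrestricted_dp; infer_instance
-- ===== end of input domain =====

-- B replaces A's scatter of 10 digit-updates per source cell by prefix-sum arrays and a
-- window-difference lookup per target cell (objective: alternative algorithm, same cost).

-- ===== PORT A =====
-- `x % m` (Python floor mod); both ports reduce a finished level with this map.
def pvModLevel (mod : Option Int) (xs : List Int) : List Int :=
  match mod with
  | none => xs
  | some m => xs.map (fun x => PySem.Int.mod x m)

-- A's inner `for d in range(10)`: c[idx] += cp; s[idx] += sp*10 + cp*d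
-- (indices are always in range on A's runs, so getD/set is exact here)
def pvAInner (cp sp : Int) (k : Nat) (cs : List Int × List Int) : List Int × List Int :=
  (List.range 10).foldl
    (fun cs d =>
      (cs.1.set (k + d) (cs.1.getD (k + d) 0 + cp),
       cs.2.set (k + d) (cs.2.getD (k + d) 0 + (sp * 10 + cp * (d : Int))))) cs

-- one level `L` of A: the two nested loops over zero-initialised arrays of size 9*L+1
def pvAStep (prevc prevs : List Int) (L : Nat) : List Int × List Int :=
  (List.range prevc.length).foldl
    (fun cs k =>
      let cp := prevc.getD k 0
      let sp := prevs.getD k 0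
      if cp = 0 ∧ sp = 0 then cs else pvAInner cp sp k cs)
    (List.replicate (9 * L + 1) 0, List.replicate (9 * L + 1) 0)

-- A's outer `for L in range(1, max_len+1)` (counts[L-1] is the last level built so far)
def pvALoop (mod : Option Int) : Nat → List (List Int) × List (List Int)
  | 0 => ([[1]], [[0]])
  | L + 1 =>
    let acc := pvALoop mod L
    let cs := pvAStep (acc.1.getLastD []) (acc.2.getLastD []) (L + 1)
    (acc.1 ++ [pvModLevel mod cs.1], acc.2 ++ [pvModLevel mod cs.2])

def build_unrestricted_dp (max_len : Int) (mod : Option Int) : List (List Int) × List (List Int) :=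
  pvALoop mod max_len.toNat

-- ===== PORT B =====
-- Source B's prefix arrays pc, ps, pj (pc[-1] is the last element, exact via getLastD)
def pvPrefix (prevc prevs : List Int) : List Int × List Int × List Int :=
  (List.range prevc.length).foldl
    (fun acc j =>
      (acc.1 ++ [acc.1.getLastD 0 + prevc.getD j 0],
       acc.2.1 ++ [acc.2.1.getLastD 0 + prevs.getD j 0],
       acc.2.2 ++ [acc.2.2.getLastD 0 + (j : Int) * prevc.getD j 0]))
    ([0], [0], [0])

-- one level `L` of B: window-difference lookups per target cell (lo = max(idx-9,0) is Nat sub)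
def pvBStep (prevc prevs : List Int) (L : Nat) : List Int × List Int :=
  let n := prevc.length
  let p := pvPrefix prevc prevs
  (List.range (9 * L + 1)).foldl
    (fun (cs : List Int × List Int) (idx : Nat) =>
      let lo := idx - 9
      let hi := min (idx + 1) n
      let cc := p.1.getD hi 0 - p.1.getD lo 0
      let sv := 10 * (p.2.1.getD hi 0 - p.2.1.getD lo 0) + (idx : Int) * cc
                  - (p.2.2.getD hi 0 - p.2.2.getD lo 0)
      (cs.1 ++ [cc], cs.2 ++ [sv]))
    ([], [])

def pvBLoop (mod : Option Int) : Nat → List (List Int) × List (List Int)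
  | 0 => ([[1]], [[0]])
  | L + 1 =>
    let acc := pvBLoop mod L
    let cs := pvBStep (acc.1.getLastD []) (acc.2.getLastD []) (L + 1)
    (acc.1 ++ [pvModLevel mod cs.1], acc.2 ++ [pvModLevel mod cs.2])

def build_unrestricted_dp_alt (max_len : Int) (mod : Option Int) : List (List Int) × List (List Int) :=
  pvBLoop mod max_len.toNat

-- ===== PRECONDITION & SPEC =====
-- A raises IndexError for max_len < 0 and ZeroDivisionError for mod = 0 with max_len ≥ 1;
-- exactly those inputs are excluded.
def Pre_build_unrestricted_dp (max_len : Int) (mod : Option Int) : Prop :=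
  0 ≤ max_len ∧ (max_len = 0 ∨ mod ≠ some 0)
instance (max_len : Int) (mod : Option Int) : Decidable (Pre_build_unrestricted_dp max_len mod) := by
  unfold Pre_build_unrestricted_dp; infer_instance

def pvWitness_build_unrestricted_dp : Int × Option Int := (3, some 10)

def Spec_build_unrestricted_dp (max_len : Int) (mod : Option Int) (out : List (List Int) × List (List Int)) : Prop := out = build_unrestricted_dp_alt max_len mod
instance (max_len : Int) (mod : Option Int) (out : List (List Int) × List (List Int)) : Decidable (Spec_build_unrestricted_dp max_len mod out) := by unfold Spec_build_unrestricted_dp; infer_instance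

-- ===== CLAIM (what is proved, stated in full; the proofs are below) =====
def Claim_equal_build_unrestricted_dp : Prop := ∀ (max_len : Int) (mod : Option Int), Dom_build_unrestricted_dp max_len mod → Pre_build_unrestricted_dp max_len mod → Spec_build_unrestricted_dp max_len mod (build_unrestricted_dp max_len mod)

-- ===== LEMMAS AND PROOFS =====

-- closed forms both levels are proved equal to
def pvPC (prevc : List Int) (k : Nat) : Int := ∑ j ∈ Finset.range k, prevc.getD j 0
def pvPS (prevs : List Int) (k : Nat) : Int := ∑ j ∈ Finset.range k, prevs.getD j 0
def pvPJ (prevc : List Int) (k : Nat) : Int := ∑ j ∈ Finset.range k, (j : Int) * prevc.getD j 0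

def pvCSum (prevc : List Int) (n idx : Nat) : Int :=
  ∑ k ∈ Finset.range n, (if k ≤ idx ∧ idx < k + 10 then prevc.getD k 0 else 0)
def pvSSum (prevc prevs : List Int) (n idx : Nat) : Int :=
  ∑ k ∈ Finset.range n,
    (if k ≤ idx ∧ idx < k + 10 then prevs.getD k 0 * 10 + prevc.getD k 0 * ((idx : Int) - (k : Int)) else 0)

lemma pv_getD_set (xs : List Int) (i j : Nat) (v : Int) :
    (xs.set i v).getD j 0 = if i = j ∧ i < xs.length then v else xs.getD j 0 := by
  simp [List.getD_eq_getElem?_getD, List.getElem?_set]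
  split_ifs with h1 h2 h3 <;> simp_all <;> omega

def pvInnerFold (cp sp : Int) (k m : Nat) (cs : List Int × List Int) : List Int × List Int :=
  (List.range m).foldl
    (fun cs d =>
      (cs.1.set (k + d) (cs.1.getD (k + d) 0 + cp),
       cs.2.set (k + d) (cs.2.getD (k + d) 0 + (sp * 10 + cp * (d : Int))))) cs

lemma pvAInner_eq (cp sp : Int) (k : Nat) (cs : List Int × List Int) :
    pvAInner cp sp k cs = pvInnerFold cp sp k 10 cs := rfl

lemma pvInnerFold_succ (cp sp : Int) (k m : Nat) (cs : List Int × List Int) :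
    pvInnerFold cp sp k (m + 1) cs =
      (let r := pvInnerFold cp sp k m cs
       (r.1.set (k + m) (r.1.getD (k + m) 0 + cp),
        r.2.set (k + m) (r.2.getD (k + m) 0 + (sp * 10 + cp * (m : Int))))) := by
  simp [pvInnerFold, List.range_succ]

-- inner fold characterisation (A): fold over range m
lemma pvInnerFold_char (cp sp : Int) (k : Nat) (m : Nat) (cs : List Int × List Int) :
    (pvInnerFold cp sp k m cs).1.length = cs.1.length ∧
    (pvInnerFold cp sp k m cs).2.length = cs.2.length ∧
    (∀ j, (pvInnerFold cp sp k m cs).1.getD j 0 =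
        cs.1.getD j 0 + (if k ≤ j ∧ j < k + m ∧ j < cs.1.length then cp else 0)) ∧
    (∀ j, (pvInnerFold cp sp k m cs).2.getD j 0 = cs.2.getD j 0 +
        (if k ≤ j ∧ j < k + m ∧ j < cs.2.length then sp * 10 + cp * ((j : Int) - (k : Int)) else 0)) := by
  induction m with
  | zero =>
    refine ⟨rfl, rfl, ?_, ?_⟩ <;> intro j <;> rw [if_neg (by omega)] <;> simp [pvInnerFold]
  | succ m ih =>
    obtain ⟨h1, h2, h3, h4⟩ := ih
    rw [pvInnerFold_succ]
    refine ⟨by simpa using h1, by simpa using h2, ?_, ?_⟩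
    · intro j
      simp only [pv_getD_set, h1]
      by_cases he : k + m = j ∧ k + m < cs.1.length
      · rw [if_pos he, if_pos (by omega), h3 (k + m), if_neg (by omega), he.1]
        ring
      · rw [if_neg he, h3 j]
        by_cases hc : k ≤ j ∧ j < k + m ∧ j < cs.1.length
        · rw [if_pos hc, if_pos (by omega)]
        · rw [if_neg hc, if_neg (by omega)]
    · intro j
      simp only [pv_getD_set, h2]
      by_cases he : k + m = j ∧ k + m < cs.2.length
      · have hm : ((j : Int) - (k : Int)) = (m : Int) := by omega
        rw [if_pos he, if_pos (by omega), h4 (k + m), if_neg (by omega), he.1, hm]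
        ring
      · rw [if_neg he, h4 j]
        by_cases hc : k ≤ j ∧ j < k + m ∧ j < cs.2.length
        · rw [if_pos hc, if_pos (by omega)]
        · rw [if_neg hc, if_neg (by omega)]

def pvOuter (prevc prevs : List Int) (L n : Nat) : List Int × List Int :=
  (List.range n).foldl
    (fun cs k =>
      let cp := prevc.getD k 0
      let sp := prevs.getD k 0
      if cp = 0 ∧ sp = 0 then cs else pvAInner cp sp k cs)
    (List.replicate (9 * L + 1) 0, List.replicate (9 * L + 1) 0)

lemma pvAStep_eq_outer (prevc prevs : List Int) (L : Nat) :
    pvAStep prevc prevs L = pvOuter prevc prevs L prevc.length := rfl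

lemma pvOuter_succ (prevc prevs : List Int) (L n : Nat) :
    pvOuter prevc prevs L (n + 1) =
      (if prevc.getD n 0 = 0 ∧ prevs.getD n 0 = 0 then pvOuter prevc prevs L n
       else pvAInner (prevc.getD n 0) (prevs.getD n 0) n (pvOuter prevc prevs L n)) := by
  simp [pvOuter, List.range_succ]

lemma pvOuter_char (prevc prevs : List Int) (L : Nat) (h : prevc.length + 9 ≤ 9 * L + 1) :
    ∀ n, n ≤ prevc.length →
    (pvOuter prevc prevs L n).1.length = 9 * L + 1 ∧
    (pvOuter prevc prevs L n).2.length = 9 * L + 1 ∧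
    (∀ idx, (pvOuter prevc prevs L n).1.getD idx 0 = pvCSum prevc n idx) ∧
    (∀ idx, (pvOuter prevc prevs L n).2.getD idx 0 = pvSSum prevc prevs n idx) := by
  intro n
  induction n with
  | zero =>
    intro _
    refine ⟨by simp [pvOuter], by simp [pvOuter], ?_, ?_⟩ <;> intro idx <;>
      simp [pvOuter, pvCSum, pvSSum]
  | succ n ih =>
    intro hn
    obtain ⟨h1, h2, h3, h4⟩ := ih (by omega)
    have eC : ∀ idx, pvCSum prevc (n + 1) idx =
        pvCSum prevc n idx + (if n ≤ idx ∧ idx < n + 10 then prevc.getD n 0 else 0) := by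
      intro idx; simp [pvCSum, Finset.sum_range_succ]
    have eS : ∀ idx, pvSSum prevc prevs (n + 1) idx =
        pvSSum prevc prevs n idx +
          (if n ≤ idx ∧ idx < n + 10 then
            prevs.getD n 0 * 10 + prevc.getD n 0 * ((idx : Int) - (n : Int)) else 0) := by
      intro idx; simp [pvSSum, Finset.sum_range_succ]
    rw [pvOuter_succ]
    by_cases hz : prevc.getD n 0 = 0 ∧ prevs.getD n 0 = 0
    · rw [if_pos hz]
      refine ⟨h1, h2, ?_, ?_⟩ <;> intro idx
      · rw [eC idx, h3 idx, hz.1]; simp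
      · rw [eS idx, h4 idx, hz.1, hz.2]; simp
    · rw [if_neg hz]
      obtain ⟨g1, g2, g3, g4⟩ :=
        pvInnerFold_char (prevc.getD n 0) (prevs.getD n 0) n 10 (pvOuter prevc prevs L n)
      rw [pvAInner_eq]
      refine ⟨by rw [g1, h1], by rw [g2, h2], ?_, ?_⟩ <;> intro idx
      · rw [g3 idx, h3 idx, h1, eC idx]
        by_cases hc : n ≤ idx ∧ idx < n + 10
        · rw [if_pos ⟨hc.1, hc.2, by omega⟩, if_pos hc]
        · rw [if_neg (fun h => hc ⟨h.1, h.2.1⟩), if_neg hc]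
      · rw [g4 idx, h4 idx, h2, eS idx]
        by_cases hc : n ≤ idx ∧ idx < n + 10
        · rw [if_pos ⟨hc.1, hc.2, by omega⟩, if_pos hc]
        · rw [if_neg (fun h => hc ⟨h.1, h.2.1⟩), if_neg hc]

lemma pvAStep_char (prevc prevs : List Int) (L : Nat)
    (h : prevc.length + 9 ≤ 9 * L + 1) :
    (pvAStep prevc prevs L).1.length = 9 * L + 1 ∧
    (pvAStep prevc prevs L).2.length = 9 * L + 1 ∧
    (∀ idx, (pvAStep prevc prevs L).1.getD idx 0 = pvCSum prevc prevc.length idx) ∧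
    (∀ idx, (pvAStep prevc prevs L).2.getD idx 0 = pvSSum prevc prevs prevc.length idx) := by
  rw [pvAStep_eq_outer]
  exact pvOuter_char prevc prevs L h prevc.length le_rfl

def pvPrefFold (prevc prevs : List Int) (m : Nat) : List Int × List Int × List Int :=
  (List.range m).foldl
    (fun acc j =>
      (acc.1 ++ [acc.1.getLastD 0 + prevc.getD j 0],
       acc.2.1 ++ [acc.2.1.getLastD 0 + prevs.getD j 0],
       acc.2.2 ++ [acc.2.2.getLastD 0 + (j : Int) * prevc.getD j 0]))
    ([0], [0], [0])

lemma pv_getLastD_map_range (f : Nat → Int) (m : Nat) :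
    ((List.range (m + 1)).map f).getLastD 0 = f m := by
  rw [List.range_succ, List.map_append]
  simp

lemma pvPrefFold_char (prevc prevs : List Int) (m : Nat) :
    pvPrefFold prevc prevs m =
      ((List.range (m + 1)).map (pvPC prevc),
       (List.range (m + 1)).map (pvPS prevs),
       (List.range (m + 1)).map (pvPJ prevc)) := by
  induction m with
  | zero => simp [pvPrefFold, pvPC, pvPS, pvPJ, List.range_succ]
  | succ m ih =>
    have hstep : pvPrefFold prevc prevs (m + 1) =
        (let acc := pvPrefFold prevc prevs m
         (acc.1 ++ [acc.1.getLastD 0 + prevc.getD m 0],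
          acc.2.1 ++ [acc.2.1.getLastD 0 + prevs.getD m 0],
          acc.2.2 ++ [acc.2.2.getLastD 0 + (m : Int) * prevc.getD m 0])) := by
      simp [pvPrefFold, List.range_succ]
    rw [hstep, ih]
    have e1 : pvPC prevc m + prevc.getD m 0 = pvPC prevc (m + 1) := by
      simp [pvPC, Finset.sum_range_succ]
    have e2 : pvPS prevs m + prevs.getD m 0 = pvPS prevs (m + 1) := by
      simp [pvPS, Finset.sum_range_succ]
    have e3 : pvPJ prevc m + (m : Int) * prevc.getD m 0 = pvPJ prevc (m + 1) := by
      simp [pvPJ, Finset.sum_range_succ]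
    simp only [pv_getLastD_map_range]
    rw [show List.range (m + 1 + 1) = List.range (m + 1) ++ [m + 1] from List.range_succ,
        List.map_append, List.map_append, List.map_append]
    simp [← e1, ← e2, ← e3, List.getD_eq_getElem?_getD]

lemma pvPrefix_char (prevc prevs : List Int) :
    pvPrefix prevc prevs =
      ((List.range (prevc.length + 1)).map (pvPC prevc),
       (List.range (prevc.length + 1)).map (pvPS prevs),
       (List.range (prevc.length + 1)).map (pvPJ prevc)) :=
  pvPrefFold_char prevc prevs prevc.length

lemma pv_foldl_pair_append (f g : Nat → Int) (xs : List Nat) (a b : List Int) :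
    xs.foldl (fun cs i => (cs.1 ++ [f i], cs.2 ++ [g i])) (a, b) = (a ++ xs.map f, b ++ xs.map g) := by
  induction xs generalizing a b with
  | nil => simp
  | cons x xs ih => simp [ih]

def pvBc (prevc prevs : List Int) (idx : Nat) : Int :=
  (pvPrefix prevc prevs).1.getD (min (idx + 1) prevc.length) 0 -
    (pvPrefix prevc prevs).1.getD (idx - 9) 0

def pvBs (prevc prevs : List Int) (idx : Nat) : Int :=
  10 * ((pvPrefix prevc prevs).2.1.getD (min (idx + 1) prevc.length) 0 -
        (pvPrefix prevc prevs).2.1.getD (idx - 9) 0) +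
    (idx : Int) * pvBc prevc prevs idx -
    ((pvPrefix prevc prevs).2.2.getD (min (idx + 1) prevc.length) 0 -
     (pvPrefix prevc prevs).2.2.getD (idx - 9) 0)

lemma pvBStep_eq_map (prevc prevs : List Int) (L : Nat) :
    pvBStep prevc prevs L =
      ((List.range (9 * L + 1)).map (pvBc prevc prevs),
       (List.range (9 * L + 1)).map (pvBs prevc prevs)) := by
  simpa using pv_foldl_pair_append (pvBc prevc prevs) (pvBs prevc prevs)
    (List.range (9 * L + 1)) [] []

lemma pv_getD_map_range (f : Nat → Int) (m t : Nat) (h : t < m) :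
    ((List.range m).map f).getD t 0 = f t := by
  simp [List.getD_eq_getElem?_getD, h]

lemma pv_filter_window (n idx L : Nat) (hL : 1 ≤ L) (hn : n = 9 * (L - 1) + 1)
    (hidx : idx < 9 * L + 1) :
    ∀ (f : Nat → Int),
      (∑ k ∈ Finset.range n, (if k ≤ idx ∧ idx < k + 10 then f k else 0)) =
        ∑ k ∈ Finset.Ico (idx - 9) (min (idx + 1) n), f k := by
  intro f
  have hsub : Finset.Ico (idx - 9) (min (idx + 1) n) ⊆ Finset.range n := by
    intro k hk
    simp only [Finset.mem_Ico, Finset.mem_range] at *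
    omega
  have hcong : (∑ k ∈ Finset.range n, (if k ≤ idx ∧ idx < k + 10 then f k else 0)) =
      ∑ k ∈ Finset.range n, (if k ∈ Finset.Ico (idx - 9) (min (idx + 1) n) then f k else 0) :=
    Finset.sum_congr rfl
      (fun k hk => by
        have hkn : k < n := Finset.mem_range.mp hk
        by_cases hc : k ≤ idx ∧ idx < k + 10
        · rw [if_pos hc, if_pos (by simp only [Finset.mem_Ico]; omega)]
        · rw [if_neg hc, if_neg (by simp only [Finset.mem_Ico]; omega)])
  rw [hcong, Finset.sum_ite_mem, Finset.inter_eq_right.mpr hsub]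

lemma pvBc_eq (prevc prevs : List Int) (L : Nat) (hL : 1 ≤ L)
    (hn : prevc.length = 9 * (L - 1) + 1) (idx : Nat) (hidx : idx < 9 * L + 1) :
    pvBc prevc prevs idx = pvCSum prevc prevc.length idx := by
  have hlo : idx - 9 < prevc.length + 1 := by omega
  have hhi : min (idx + 1) prevc.length < prevc.length + 1 := by omega
  rw [pvCSum, pv_filter_window prevc.length idx L hL hn hidx]
  rw [pvBc, pvPrefix_char]
  simp only [pv_getD_map_range _ _ _ hhi, pv_getD_map_range _ _ _ hlo]
  rw [Finset.sum_Ico_eq_sub _ (by omega), pvPC, pvPC]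

lemma pvBs_eq (prevc prevs : List Int) (L : Nat) (hL : 1 ≤ L)
    (hn : prevc.length = 9 * (L - 1) + 1) (idx : Nat) (hidx : idx < 9 * L + 1) :
    pvBs prevc prevs idx = pvSSum prevc prevs prevc.length idx := by
  have hlo : idx - 9 < prevc.length + 1 := by omega
  have hhi : min (idx + 1) prevc.length < prevc.length + 1 := by omega
  rw [pvSSum, pv_filter_window prevc.length idx L hL hn hidx]
  rw [pvBs, pvBc, pvPrefix_char]
  simp only [pv_getD_map_range _ _ _ hhi, pv_getD_map_range _ _ _ hlo]
  have hle : idx - 9 ≤ min (idx + 1) prevc.length := by omega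
  have hC : pvPC prevc (min (idx + 1) prevc.length) - pvPC prevc (idx - 9) =
      ∑ k ∈ Finset.Ico (idx - 9) (min (idx + 1) prevc.length), prevc.getD k 0 := by
    rw [pvPC, pvPC]; exact (Finset.sum_Ico_eq_sub _ hle).symm
  have hS : pvPS prevs (min (idx + 1) prevc.length) - pvPS prevs (idx - 9) =
      ∑ k ∈ Finset.Ico (idx - 9) (min (idx + 1) prevc.length), prevs.getD k 0 := by
    rw [pvPS, pvPS]; exact (Finset.sum_Ico_eq_sub _ hle).symm
  have hJ : pvPJ prevc (min (idx + 1) prevc.length) - pvPJ prevc (idx - 9) =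
      ∑ k ∈ Finset.Ico (idx - 9) (min (idx + 1) prevc.length), (k : Int) * prevc.getD k 0 := by
    rw [pvPJ, pvPJ]; exact (Finset.sum_Ico_eq_sub _ hle).symm
  rw [hC, hS, hJ, Finset.mul_sum, Finset.mul_sum, ← Finset.sum_add_distrib,
      ← Finset.sum_sub_distrib]
  exact Finset.sum_congr rfl (fun k _ => by ring)

lemma pv_getD_eq_getElem (xs : List Int) (i : Nat) (h : i < xs.length) :
    xs.getD i 0 = xs[i] := by
  simp [List.getD_eq_getElem?_getD, List.getElem?_eq_getElem h]

lemma pvStep_eq (prevc prevs : List Int) (L : Nat)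
    (hL : 1 ≤ L) (hn : prevc.length = 9 * (L - 1) + 1) (hs : prevs.length = prevc.length) :
    pvAStep prevc prevs L = pvBStep prevc prevs L := by
  obtain ⟨h1, h2, h3, h4⟩ := pvAStep_char prevc prevs L (by omega)
  rw [pvBStep_eq_map]
  refine Prod.ext ?_ ?_
  · apply List.ext_getElem (by simp [h1])
    intro i hi1 hi2
    have hidx : i < 9 * L + 1 := by rw [h1] at hi1; exact hi1
    rw [← pv_getD_eq_getElem _ _ hi1, h3 i]
    rw [List.getElem_map, List.getElem_range]
    exact (pvBc_eq prevc prevs L hL hn i hidx).symm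
  · apply List.ext_getElem (by simp [h2])
    intro i hi1 hi2
    have hidx : i < 9 * L + 1 := by rw [h2] at hi1; exact hi1
    rw [← pv_getD_eq_getElem _ _ hi1, h4 i]
    rw [List.getElem_map, List.getElem_range]
    exact (pvBs_eq prevc prevs L hL hn i hidx).symm

lemma pvModLevel_length (mod : Option Int) (xs : List Int) :
    (pvModLevel mod xs).length = xs.length := by
  cases mod <;> simp [pvModLevel]

lemma pvLoop_eq (mod : Option Int) (L : Nat) :
    pvALoop mod L = pvBLoop mod L ∧
    ((pvALoop mod L).1.getLastD []).length = 9 * L + 1 ∧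
    ((pvALoop mod L).2.getLastD []).length = 9 * L + 1 := by
  induction L with
  | zero => exact ⟨rfl, rfl, rfl⟩
  | succ L ih =>
    obtain ⟨hEq, hc, hs⟩ := ih
    have hstep : pvAStep ((pvALoop mod L).1.getLastD []) ((pvALoop mod L).2.getLastD []) (L + 1) =
        pvBStep ((pvALoop mod L).1.getLastD []) ((pvALoop mod L).2.getLastD []) (L + 1) :=
      pvStep_eq _ _ _ (by omega) (by rw [hc]; omega) (hs.trans hc.symm)
    obtain ⟨g1, g2, _, _⟩ :=
      pvAStep_char ((pvALoop mod L).1.getLastD []) ((pvALoop mod L).2.getLastD []) (L + 1)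
        (by rw [hc]; omega)
    refine ⟨?_, ?_, ?_⟩
    · show ((pvALoop mod L).1 ++ _, (pvALoop mod L).2 ++ _) =
        ((pvBLoop mod L).1 ++ _, (pvBLoop mod L).2 ++ _)
      rw [← hEq, ← hstep]
    · rw [show (pvALoop mod (L + 1)).1 =
            (pvALoop mod L).1 ++ [pvModLevel mod
              (pvAStep ((pvALoop mod L).1.getLastD []) ((pvALoop mod L).2.getLastD []) (L + 1)).1]
          from rfl, List.getLastD_concat, pvModLevel_length, g1]
    · rw [show (pvALoop mod (L + 1)).2 =
            (pvALoop mod L).2 ++ [pvModLevel mod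
              (pvAStep ((pvALoop mod L).1.getLastD []) ((pvALoop mod L).2.getLastD []) (L + 1)).2]
          from rfl, List.getLastD_concat, pvModLevel_length, g2]

-- ===== VERDICT (by name: the statement is the Claim_ definition above) =====
theorem build_unrestricted_dp_spec : Claim_equal_build_unrestricted_dp := by
  intro max_len mod _ _
  unfold Spec_build_unrestricted_dp build_unrestricted_dp build_unrestricted_dp_alt
  exact (pvLoop_eq mod max_len.toNat).1
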